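-- pv_equiv track=rewrite | github.com/dgsim126/Algo_Study_2 | Programmers/심동근/250330/높은 곳으로.py | solution
-- ===== SOURCE A (Python) =====
-- def solution(N, P):
--     current_floor= 0
--     flag= True
--
--     for i in range(1, N+1):
--         if(current_floor+i==P):
--             flag= False
--             continue
--         else:
--             current_floor+=i
--
--     if(flag==True):
--         return current_floor
--     return current_floor-1
-- ===== SOURCE B (Python) =====
-- def _isqrt(n):
--     # floor square root, recursive doubling method (n >= 0)
--     if n < 2:
--         return n
--     r = _isqrt(n // 4) * 2
--     if (r + 1) * (r + 1) <= n:
--         return r + 1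
--     return r
--
--
-- def solution(N, P):
--     # Closed form: total climb is T(N)=N(N+1)/2; the step is skipped exactly
--     # when P is a triangular number T(i) with 1 <= i <= N, and then the answer
--     # is T(N) - i - 1 (the skipped step i, and A's final -1).
--     if N < 1:
--         return 0
--     t = N * (N + 1) // 2
--     if P >= 1:
--         i = (_isqrt(8 * P + 1) - 1) // 2
--         if i * (i + 1) // 2 == P and i <= N:
--             return t - i - 1
--     return t
-- ===== Notes on version B (the rewrite author's own statement) =====
-- stated objective: faster
-- what changed: Replaced the O(N) simulation loop with the closed-form triangular sum N(N+1)/2 plus an O(log P) integer-sqrt test of whether P is a triangular number T(i) with i<=N (the only step A ever skips), subtracting i+1 when it is.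
import Mathlib
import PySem

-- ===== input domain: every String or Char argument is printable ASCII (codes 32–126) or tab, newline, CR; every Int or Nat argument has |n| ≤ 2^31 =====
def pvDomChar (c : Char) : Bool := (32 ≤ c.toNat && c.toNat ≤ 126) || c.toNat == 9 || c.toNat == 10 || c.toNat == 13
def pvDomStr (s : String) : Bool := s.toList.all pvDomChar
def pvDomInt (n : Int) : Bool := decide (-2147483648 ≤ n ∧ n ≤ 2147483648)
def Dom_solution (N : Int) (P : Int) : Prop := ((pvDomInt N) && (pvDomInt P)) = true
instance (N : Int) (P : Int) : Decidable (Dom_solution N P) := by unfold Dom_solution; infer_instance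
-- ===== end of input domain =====

-- B replaces A's step-by-step climbing loop with the closed-form triangular sum and an
-- integer-sqrt test of whether P is a triangular number (objective: faster).

-- ===== PORT A =====
def solution (N : Int) (P : Int) : Int :=
  let r := (PySem.List.pyRange 1 (N + 1) 1).foldl
    (fun (st : Int × Bool) i =>
      if st.1 + i = P then (st.1, false) else (st.1 + i, st.2))
    (0, true)
  if r.2 then r.1 else r.1 - 1

-- ===== PORT B =====
-- Source B's hand-written recursive floor square root (_isqrt), ported step for step
def isqrtB (n : Int) : Int :=
  if n < 2 then n
  else
    let r := isqrtB (PySem.Int.floordiv n 4) * 2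
    if (r + 1) * (r + 1) ≤ n then r + 1 else r
termination_by n.toNat
decreasing_by
  rw [PySem.Int.floordiv_eq_ediv_of_pos (by norm_num : (0:Int) < 4)]
  omega

def solution_alt (N : Int) (P : Int) : Int :=
  if N < 1 then 0
  else
    let t := PySem.Int.floordiv (N * (N + 1)) 2
    if P ≥ 1 then
      let i := PySem.Int.floordiv (isqrtB (8 * P + 1) - 1) 2
      if PySem.Int.floordiv (i * (i + 1)) 2 = P ∧ i ≤ N then t - i - 1 else t
    else t

-- ===== PRECONDITION & SPEC =====
def Spec_solution (N : Int) (P : Int) (out : Int) : Prop := out = solution_alt N P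
instance (N : Int) (P : Int) (out : Int) : Decidable (Spec_solution N P out) := by unfold Spec_solution; infer_instance

-- ===== CLAIM (what is proved, stated in full; the proofs are below) =====
def Claim_equal_solution : Prop := ∀ (N : Int) (P : Int), Dom_solution N P → Spec_solution N P (solution N P)

-- ===== LEMMAS AND PROOFS =====

-- the triangular numbers, used only in the proofs
def Tri (k : Int) : Int := k * (k + 1) / 2

theorem tri_two (k : Int) : 2 * Tri k = k * (k + 1) := by
  obtain ⟨m, hm⟩ := Int.even_mul_succ_self k
  have h : k * (k + 1) = 2 * m := by omega
  simp [Tri, h, Int.mul_ediv_cancel_left _ (by norm_num : (2:Int) ≠ 0)]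

theorem tri_floordiv (k : Int) : PySem.Int.floordiv (k * (k + 1)) 2 = Tri k := by
  rw [PySem.Int.floordiv_eq_ediv_of_pos (by norm_num : (0:Int) < 2)]; rfl

theorem tri_succ (k : Int) : Tri (k + 1) = Tri k + (k + 1) := by
  have h1 := tri_two k
  have h2 := tri_two (k + 1)
  nlinarith

theorem tri_mono {a b : Int} (ha : 0 ≤ a) (hab : a ≤ b) : Tri a ≤ Tri b := by
  have h1 := tri_two a
  have h2 := tri_two b
  nlinarith

theorem tri_strict {a b : Int} (ha : 0 ≤ a) (hab : a < b) : Tri a < Tri b := by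
  have h1 := tri_two a
  have h2 := tri_two b
  nlinarith

theorem isqrtB_spec (n : Int) (hn : 0 ≤ n) :
    0 ≤ isqrtB n ∧ isqrtB n * isqrtB n ≤ n ∧ n < (isqrtB n + 1) * (isqrtB n + 1) := by
  induction hm : n.toNat using Nat.strong_induction_on generalizing n with
  | _ m ih =>
    by_cases h : n < 2
    · rw [isqrtB, if_pos h]
      refine ⟨hn, by nlinarith, by nlinarith⟩
    · have hval : isqrtB n =
          if (isqrtB (PySem.Int.floordiv n 4) * 2 + 1) * (isqrtB (PySem.Int.floordiv n 4) * 2 + 1) ≤ n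
          then isqrtB (PySem.Int.floordiv n 4) * 2 + 1
          else isqrtB (PySem.Int.floordiv n 4) * 2 := by
        rw [isqrtB, if_neg h]
      have hfd : PySem.Int.floordiv n 4 = n / 4 :=
        PySem.Int.floordiv_eq_ediv_of_pos (by norm_num : (0:Int) < 4)
      rw [hfd] at hval
      have hlt : (n / 4).toNat < m := by omega
      obtain ⟨ih0, ih1, ih2⟩ := ih (n / 4).toNat hlt (n / 4) (by omega) rfl
      have h4 : 4 * (n / 4) ≤ n ∧ n < 4 * (n / 4) + 4 := by omega
      by_cases hc : (isqrtB (n / 4) * 2 + 1) * (isqrtB (n / 4) * 2 + 1) ≤ n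
      · rw [hval, if_pos hc]
        exact ⟨by omega, hc, by nlinarith⟩
      · rw [hval, if_neg hc]
        refine ⟨by omega, by nlinarith, by omega⟩

theorem isqrtB_unique {n s : Int} (hs : 0 ≤ s) (h1 : s * s ≤ n) (h2 : n < (s + 1) * (s + 1)) :
    isqrtB n = s := by
  have hn : 0 ≤ n := by nlinarith
  obtain ⟨q0, q1, q2⟩ := isqrtB_spec n hn
  nlinarith [sq_nonneg (isqrtB n - s)]

-- if P = Tri j with j ≥ 1, B's index computation recovers j
theorem idx_eq (P j : Int) (hj : 1 ≤ j) (hPj : Tri j = P) :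
    PySem.Int.floordiv (isqrtB (8 * P + 1) - 1) 2 = j := by
  have h2 := tri_two j
  have hs : isqrtB (8 * P + 1) = 2 * j + 1 :=
    isqrtB_unique (by omega) (by nlinarith) (by nlinarith)
  rw [hs, PySem.Int.floordiv_eq_ediv_of_pos (by norm_num : (0:Int) < 2)]
  omega

theorem idx_pos (P : Int) (hP : 1 ≤ P) :
    1 ≤ PySem.Int.floordiv (isqrtB (8 * P + 1) - 1) 2 := by
  obtain ⟨q0, q1, q2⟩ := isqrtB_spec (8 * P + 1) (by omega)
  have h3 : 3 ≤ isqrtB (8 * P + 1) := by nlinarith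
  rw [PySem.Int.floordiv_eq_ediv_of_pos (by norm_num : (0:Int) < 2)]
  omega

-- A's loop when P is not a positive triangular number: never skips
theorem loop_no (P : Int) (hP : ∀ j : Int, 1 ≤ j → Tri j ≠ P) :
    ∀ k : Int, 0 ≤ k →
      (PySem.List.pyRange 1 (k + 1) 1).foldl
        (fun (st : Int × Bool) i =>
          if st.1 + i = P then (st.1, false) else (st.1 + i, st.2)) (0, true)
      = (Tri k, true) := by
  intro k hk
  induction k, hk using Int.le_induction with
  | base => rw [PySem.List.pyRange_one_eq_nil (by omega : (0:Int) + 1 ≤ 1)]; simp [Tri]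
  | succ k hk ih =>
    rw [PySem.List.pyRange_one_succ_right (by omega : (1:Int) ≤ k + 1), List.foldl_append, ih]
    simp only [List.foldl_cons, List.foldl_nil]
    rw [if_neg (by rw [← tri_succ]; exact hP (k + 1) (by omega)), tri_succ]

-- A's loop when P = Tri j, j ≥ 1: skips exactly step j (and only that one)
theorem loop_yes (P j : Int) (hj : 1 ≤ j) (hPj : Tri j = P) :
    ∀ k : Int, 0 ≤ k →
      (PySem.List.pyRange 1 (k + 1) 1).foldl
        (fun (st : Int × Bool) i =>
          if st.1 + i = P then (st.1, false) else (st.1 + i, st.2)) (0, true)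
      = if k < j then (Tri k, true) else (Tri k - j, false) := by
  intro k hk
  induction k, hk using Int.le_induction with
  | base =>
    rw [PySem.List.pyRange_one_eq_nil (by omega : (0:Int) + 1 ≤ 1), if_pos (by omega : (0:Int) < j)]
    simp [Tri]
  | succ k hk ih =>
    rw [PySem.List.pyRange_one_succ_right (by omega : (1:Int) ≤ k + 1), List.foldl_append, ih]
    simp only [List.foldl_cons, List.foldl_nil]
    rcases lt_trichotomy (k + 1) j with hlt | heq | hgt
    · rw [if_pos (by omega : k < j)]
      simp only
      have hne : Tri k + (k + 1) ≠ P := by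
        rw [← tri_succ]
        intro hEq
        have := tri_strict (by omega : (0:Int) ≤ k + 1) hlt
        omega
      rw [if_neg hne, if_pos hlt, tri_succ]
    · rw [if_pos (by omega : k < j)]
      simp only
      have hyes : Tri k + (k + 1) = P := by rw [← tri_succ, heq]; exact hPj
      rw [if_pos hyes, if_neg (by omega : ¬ k + 1 < j)]
      have := tri_succ k
      exact Prod.ext (by omega) rfl
    · rw [if_neg (by omega : ¬ k < j)]
      simp only
      have hne : Tri k - j + (k + 1) ≠ P := by
        intro hEq
        have hm := tri_mono (by omega : (0:Int) ≤ j + 1) (by omega : j + 1 ≤ k + 1)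
        have h1 := tri_succ j
        have h2 := tri_succ k
        omega
      rw [if_neg hne, if_neg (by omega : ¬ k + 1 < j)]
      have := tri_succ k
      exact Prod.ext (by omega) rfl

theorem main_eq (N P : Int) : solution N P = solution_alt N P := by
  by_cases hN : N < 1
  · unfold solution solution_alt
    rw [PySem.List.pyRange_one_eq_nil (by omega : N + 1 ≤ 1)]
    simp [hN]
  · replace hN : 1 ≤ N := by omega
    unfold solution solution_alt
    by_cases hT : ∃ j : Int, 1 ≤ j ∧ Tri j = P
    · obtain ⟨j, hj, hPj⟩ := hT
      have hP1 : P ≥ 1 := by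
        have := tri_mono (by norm_num : (0:Int) ≤ 1) hj
        have h1 : Tri 1 = 1 := by decide
        omega
      rw [loop_yes P j hj hPj N (by omega)]
      simp only [if_neg (show ¬ N < 1 by omega), if_pos hP1, idx_eq P j hj hPj,
        tri_floordiv]
      by_cases hjN : j ≤ N
      · have hcond : Tri j = P ∧ j ≤ N := ⟨hPj, hjN⟩
        rw [if_neg (show ¬ N < j by omega)]
        simp [hcond]
      · have hcond : ¬ (Tri j = P ∧ j ≤ N) := fun hand => hjN hand.2
        rw [if_pos (show N < j by omega)]
        simp [hcond]
    · rw [loop_no P (fun j hji hEq => hT ⟨j, hji, hEq⟩) N (by omega)]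
      simp only [if_neg (show ¬ N < 1 by omega), tri_floordiv]
      by_cases hP1 : P ≥ 1
      · have hI : 1 ≤ (isqrtB (8 * P + 1) - 1) / 2 := by
          have h := idx_pos P hP1
          rwa [PySem.Int.floordiv_eq_ediv_of_pos (by norm_num : (0:Int) < 2)] at h
        have hcond : ¬ (Tri ((isqrtB (8 * P + 1) - 1) / 2) = P ∧
            (isqrtB (8 * P + 1) - 1) / 2 ≤ N) := fun hand => hT ⟨_, hI, hand.1⟩
        simp [hP1, hcond]
      · simp [hP1]

-- ===== VERDICT (by name: the statement is the Claim_ definition above) =====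
theorem solution_spec : Claim_equal_solution := by
  intro N P _
  unfold Spec_solution
  exact main_eq N P
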